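-- pv_equiv track=rewrite | github.com/korengaus/policy_ai | policy_impact.py | _detect_by_rules
-- ===== SOURCE A (Python) =====
-- def _detect_by_rules(text: str, rules: dict[str, list[str]]) -> tuple[list[str], list[str]]:
--     detected = []
--     reasons = []
--
--     for label, keywords in rules.items():
--         matched = [keyword for keyword in keywords if keyword and keyword in text]
--         if matched:
--             detected.append(label)
--             reasons.append(f"detected {label}: {matched[0]}")
--
--     return detected, reasons
-- ===== SOURCE B (Python) =====
-- def _detect_by_rules(text: str, rules: dict[str, list[str]]) -> tuple[list[str], list[str]]:
--     maxlen = max((len(k) for kws in rules.values() for k in kws), default=0)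
--     subs = {text[i:i + l] for i in range(len(text)) for l in range(1, maxlen + 1)}
--     detected = []
--     reasons = []
--     for label, keywords in rules.items():
--         for keyword in keywords:
--             if keyword in subs:
--                 detected.append(label)
--                 reasons.append(f"detected {label}: {keyword}")
--                 break
--     return detected, reasons
-- ===== Notes on version B (the rewrite author's own statement) =====
-- stated objective: faster
-- what changed: B replaces the per-keyword substring scan of the text by a substring index: it builds one set of all text substrings up to the maximal keyword length, answers each keyword by a set lookup, and takes the first matching keyword per label with an early break instead of filtering all keywords.
import Mathlib
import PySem

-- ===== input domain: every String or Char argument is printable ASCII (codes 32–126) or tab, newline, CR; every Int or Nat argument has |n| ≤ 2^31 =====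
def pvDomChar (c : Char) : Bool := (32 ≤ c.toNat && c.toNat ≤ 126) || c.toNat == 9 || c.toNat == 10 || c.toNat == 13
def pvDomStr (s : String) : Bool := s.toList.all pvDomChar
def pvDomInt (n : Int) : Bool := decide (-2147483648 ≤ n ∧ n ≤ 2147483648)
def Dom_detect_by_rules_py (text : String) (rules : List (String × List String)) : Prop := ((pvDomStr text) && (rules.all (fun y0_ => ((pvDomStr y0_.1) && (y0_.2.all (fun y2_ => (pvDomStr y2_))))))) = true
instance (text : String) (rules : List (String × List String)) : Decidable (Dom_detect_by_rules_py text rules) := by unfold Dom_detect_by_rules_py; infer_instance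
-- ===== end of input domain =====

-- B replaces the per-keyword scan of the text by a substring index: one set of all text substrings up
-- to the maximal keyword length, then a set lookup per keyword with an early break per label; same
-- return value on every input, no argument is mutated by either version.

-- ===== PORT A =====
-- rules is a Python dict: the pairs the function iterates are those after dict construction
-- (duplicate key: first position, last value) = (PySem.Dict.ofList rules).items.
def detect_by_rules_py (text : String) (rules : List (String × List String)) : List String × List String :=
  (PySem.Dict.ofList rules).items.foldl
    (fun acc lk =>
      let matched := lk.2.filter (fun kw => !(kw == "") && PySem.Str.isIn kw text)
      match matched with
      | [] => acc
      | m :: _ => (acc.1 ++ [lk.1], acc.2 ++ ["detected " ++ lk.1 ++ ": " ++ m]))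
    ([], [])

-- ===== PORT B =====
-- inner 'for keyword in keywords: if keyword in subs: …; break' = first keyword found in the set
def altFirstMatch (subs : PySem.Set (List Char)) : List String → Option String
  | [] => none
  | kw :: ks => if subs.contains kw.toList then some kw else altFirstMatch subs ks

def detect_by_rules_py_alt (text : String) (rules : List (String × List String)) : List String × List String :=
  let items := (PySem.Dict.ofList rules).items
  -- maxlen = max((len(k) for kws in rules.values() for k in kws), default=0)
  let maxlen : Nat := (items.flatMap (fun lk => lk.2)).foldl (fun m kw => max m kw.toList.length) 0
  -- subs = {text[i:i+l] for i in range(len(text)) for l in range(1, maxlen+1)}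
  let subs := PySem.Set.ofList
    ((List.range text.toList.length).flatMap (fun (i : Nat) =>
      (PySem.List.pyRange 1 ((maxlen : Int) + 1) 1).map (fun l =>
        PySem.List.slice text.toList (some (i : Int)) (some ((i : Int) + l)))))
  items.foldl
    (fun acc lk =>
      match altFirstMatch subs lk.2 with
      | some kw => (acc.1 ++ [lk.1], acc.2 ++ ["detected " ++ lk.1 ++ ": " ++ kw])
      | none => acc)
    ([], [])

-- ===== PRECONDITION & SPEC =====
def Spec_detect_by_rules_py (text : String) (rules : List (String × List String)) (out : List String × List String) : Prop := out = detect_by_rules_py_alt text rules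
instance (text : String) (rules : List (String × List String)) (out : List String × List String) : Decidable (Spec_detect_by_rules_py text rules out) := by unfold Spec_detect_by_rules_py; infer_instance

-- ===== CLAIM (what is proved, stated in full; the proofs are below) =====
def Claim_equal_detect_by_rules_py : Prop := ∀ (text : String) (rules : List (String × List String)), Dom_detect_by_rules_py text rules → Spec_detect_by_rules_py text rules (detect_by_rules_py text rules)

-- ===== LEMMAS AND PROOFS =====

-- the list of substrings B indexes, named for the proofs (definitionally the list inside port B)
def subsList (s : List Char) (M : Nat) : List (List Char) :=
  (List.range s.length).flatMap (fun (i : Nat) =>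
    (PySem.List.pyRange 1 ((M : Int) + 1) 1).map (fun l =>
      PySem.List.slice s (some (i : Int)) (some ((i : Int) + l))))

lemma mem_subsList (s : List Char) (M : Nat) (kw : List Char) :
    kw ∈ subsList s M ↔ kw ≠ [] ∧ kw.length ≤ M ∧ kw <:+: s := by
  unfold subsList
  rw [PySem.List.pyRange_one]
  have hM : ((M : Int) + 1 - 1).toNat = M := by omega
  rw [hM]
  constructor
  · intro h
    obtain ⟨i, hi, h2⟩ := List.mem_flatMap.mp h
    rw [List.mem_range] at hi
    obtain ⟨l, hl, rfl⟩ := List.mem_map.mp h2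
    obtain ⟨k, hk, rfl⟩ := List.mem_map.mp hl
    rw [List.mem_range] at hk
    have hcast : (1 : Int) + (k : Int) = ((k + 1 : Nat) : Int) := by push_cast; ring
    rw [hcast, PySem.List.slice_natCast_add]
    have hdrop : s.drop i ≠ [] := by
      simp [List.drop_eq_nil_iff]; omega
    refine ⟨?_, ?_, ?_⟩
    · simp [List.take_eq_nil_iff, hdrop]
    · simp only [List.length_take, List.length_drop]
      omega
    · exact ((List.take_prefix _ _).isInfix).trans ((List.drop_suffix i s).isInfix)
  · rintro ⟨hne, hlen, hinf⟩
    have hIn : PySem.Chars.isIn kw s = true := (PySem.Chars.isIn_iff_infix kw s).mpr hinf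
    obtain ⟨j, hpre⟩ := (PySem.Chars.exists_prefix_drop_iff_isIn kw s).mpr hIn
    have hj : j < s.length := by
      by_contra hge
      have hnil : s.drop j = [] := by rw [List.drop_eq_nil_iff]; omega
      rw [hnil] at hpre
      exact hne (List.prefix_nil.mp hpre)
    have hpos : 1 ≤ kw.length := by
      cases kw with
      | nil => exact absurd rfl hne
      | cons a t => simp
    refine List.mem_flatMap.mpr ⟨j, List.mem_range.mpr hj, ?_⟩
    refine List.mem_map.mpr ⟨(1 : Int) + ((kw.length - 1 : Nat) : Int),
      List.mem_map.mpr ⟨kw.length - 1, List.mem_range.mpr (by omega), rfl⟩, ?_⟩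
    have hcast : (j : Int) + ((1 : Int) + ((kw.length - 1 : Nat) : Int)) = (j : Int) + ((kw.length : Nat) : Int) := by
      omega
    rw [hcast, PySem.List.slice_natCast_add]
    exact (List.prefix_iff_eq_take.mp hpre).symm

-- for a keyword no longer than the index depth, a set lookup equals A's test 'kw and kw in text'
lemma contains_eq (text : String) (M : Nat) (kw : String) (h : kw.toList.length ≤ M) :
    (PySem.Set.ofList (subsList text.toList M)).contains kw.toList
      = (!(kw == "") && PySem.Str.isIn kw text) := by
  rw [Bool.eq_iff_iff]
  rw [PySem.Set.contains_iff, PySem.Set.mem_ofList, mem_subsList]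
  simp only [Bool.and_eq_true, Bool.not_eq_eq_eq_not, Bool.not_true, beq_eq_false_iff_ne,
    ne_eq, PySem.Str.isIn_iff_infix]
  constructor
  · rintro ⟨hne, _, hinf⟩
    refine ⟨fun he => hne ?_, hinf⟩
    rw [he]; rfl
  · rintro ⟨hne, hinf⟩
    refine ⟨fun he => hne ?_, h, hinf⟩
    have : kw.toList = "".toList := by simpa using he
    exact String.toList_injective this

-- B's first-match-with-break equals the head of A's filtered list
lemma firstMatch_eq (text : String) (M : Nat) (ks : List String)
    (h : ∀ kw ∈ ks, kw.toList.length ≤ M) :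
    altFirstMatch (PySem.Set.ofList (subsList text.toList M)) ks
      = (ks.filter (fun kw => !(kw == "") && PySem.Str.isIn kw text)).head? := by
  induction ks with
  | nil => rfl
  | cons kw ks ih =>
    rw [List.filter_cons]
    have hc := contains_eq text M kw (h kw (by simp))
    by_cases hb : (!(kw == "") && PySem.Str.isIn kw text) = true
    · rw [if_pos hb]
      simp only [altFirstMatch]
      rw [hc, if_pos hb]
      rfl
    · rw [if_neg hb]
      simp only [altFirstMatch]
      rw [hc, if_neg hb]
      exact ih (fun k hk => h k (by simp [hk]))

-- the two folds over the rule items agree once every keyword fits under the index depth M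
lemma fold_eq (text : String) (M : Nat) (items : List (String × List String))
    (h : ∀ lk ∈ items, ∀ kw ∈ lk.2, kw.toList.length ≤ M) (acc : List String × List String) :
    items.foldl (fun acc lk =>
      let matched := lk.2.filter (fun kw => !(kw == "") && PySem.Str.isIn kw text)
      match matched with
      | [] => acc
      | m :: _ => (acc.1 ++ [lk.1], acc.2 ++ ["detected " ++ lk.1 ++ ": " ++ m])) acc
    = items.foldl (fun acc lk =>
      match altFirstMatch (PySem.Set.ofList (subsList text.toList M)) lk.2 with
      | some kw => (acc.1 ++ [lk.1], acc.2 ++ ["detected " ++ lk.1 ++ ": " ++ kw])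
      | none => acc) acc := by
  induction items generalizing acc with
  | nil => rfl
  | cons lk rest ih =>
    simp only [List.foldl_cons]
    rw [firstMatch_eq text M lk.2 (h lk (by simp))]
    have hrest : ∀ p ∈ rest, ∀ kw ∈ p.2, kw.toList.length ≤ M :=
      fun p hp => h p (by simp [hp])
    cases lk.2.filter (fun kw => !(kw == "") && PySem.Str.isIn kw text) with
    | nil => exact ih hrest _
    | cons m t => exact ih hrest _

-- ===== VERDICT (by name: the statement is the Claim_ definition above) =====
theorem detect_by_rules_py_spec : Claim_equal_detect_by_rules_py := by
  intro text rules _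
  unfold Spec_detect_by_rules_py detect_by_rules_py detect_by_rules_py_alt
  have hbound : ∀ lk ∈ (PySem.Dict.ofList rules).items, ∀ kw ∈ lk.2,
      kw.toList.length ≤ (((PySem.Dict.ofList rules).items.flatMap (fun lk => lk.2)).foldl
        (fun m kw => max m kw.toList.length) 0) :=
    fun lk hlk kw hkw =>
      (PySem.List.le_foldl_max_nat ((PySem.Dict.ofList rules).items.flatMap (fun lk => lk.2))
        (fun kw => kw.toList.length) 0).2 kw (List.mem_flatMap.mpr ⟨lk, hlk, hkw⟩)
  exact fold_eq text _ ((PySem.Dict.ofList rules).items) hbound ([], [])
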